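-- pv_equiv track=rewrite | github.com/JoaoCosta94/mce | HomeWork4/HW4_1.py | ravelIdx
-- ===== SOURCE A (Python) =====
-- def ravelIdx(idx, shape):
--     idx = [shape[i] + idx[i] if idx[i] < 0 else idx[i] for i in range(len(idx))]
--     I = 0
--     dim = 1
--     for i in range(-1, -len(idx) - 1, -1):
--         I += idx[i]*dim
--         dim *= shape[i]
--     return I
-- ===== SOURCE B (Python) =====
-- def ravelIdx(idx, shape):
--     norm = [s + j if j < 0 else j for j, s in zip(idx, shape)]
--     tail = shape[len(shape) - len(idx):]
--     I = 0
--     for j, s in zip(norm, tail):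
--         I = I * s + j
--     return I
-- ===== Notes on version B (the rewrite author's own statement) =====
-- stated objective: alternative
-- what changed: A accumulates a running stride (dim) back-to-front and sums idx[i]*dim; B normalizes via zip and then computes the flat index by a front-to-back Horner fold I = I*s + j over the index/trailing-shape pairs, with no stride accumulator at all.
import Mathlib
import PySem

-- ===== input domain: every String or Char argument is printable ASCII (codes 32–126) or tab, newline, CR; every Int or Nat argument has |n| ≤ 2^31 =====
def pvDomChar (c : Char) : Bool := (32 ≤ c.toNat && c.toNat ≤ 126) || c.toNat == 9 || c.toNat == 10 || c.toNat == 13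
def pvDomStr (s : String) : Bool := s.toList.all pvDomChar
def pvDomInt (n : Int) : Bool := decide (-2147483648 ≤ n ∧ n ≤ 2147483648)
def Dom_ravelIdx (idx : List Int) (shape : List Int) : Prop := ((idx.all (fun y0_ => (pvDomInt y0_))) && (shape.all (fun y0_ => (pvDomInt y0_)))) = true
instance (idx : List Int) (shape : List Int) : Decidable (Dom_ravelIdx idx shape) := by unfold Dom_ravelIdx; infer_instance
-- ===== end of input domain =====

-- B replaces A's back-to-front stride accumulation by a front-to-back Horner fold; objective: alternative (same cost, no stride accumulator).

-- ===== PORT A =====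
def ravelIdx (idx : List Int) (shape : List Int) : Int :=
  let idx2 := (PySem.List.pyRange 0 (idx.length : Int) 1).map (fun i =>
    if PySem.List.pyGetD idx i 0 < 0 then PySem.List.pyGetD shape i 0 + PySem.List.pyGetD idx i 0
    else PySem.List.pyGetD idx i 0)
  let r := (PySem.List.pyRange (-1) (-(idx2.length : Int) - 1) (-1)).foldl
    (fun (p : Int × Int) i =>
      (p.1 + PySem.List.pyGetD idx2 i 0 * p.2, p.2 * PySem.List.pyGetD shape i 0)) (0, 1)
  r.1

-- ===== PORT B =====
def ravelIdx_alt (idx : List Int) (shape : List Int) : Int :=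
  let norm := (idx.zip shape).map (fun js => if js.1 < 0 then js.2 + js.1 else js.1)
  let tail := PySem.List.slice shape (some ((shape.length : Int) - (idx.length : Int))) none
  (norm.zip tail).foldl (fun I js => I * js.2 + js.1) 0

-- ===== PRECONDITION & SPEC =====
-- Pre_ excludes exactly the inputs where A raises IndexError (shape[i] out of range in its back-indexed loop).
def Pre_ravelIdx (idx : List Int) (shape : List Int) : Prop := idx.length ≤ shape.length
instance (idx : List Int) (shape : List Int) : Decidable (Pre_ravelIdx idx shape) := by unfold Pre_ravelIdx; infer_instance
def pvWitness_ravelIdx : List Int × List Int := ([1, -2], [3, 4])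

def Spec_ravelIdx (idx : List Int) (shape : List Int) (out : Int) : Prop := out = ravelIdx_alt idx shape
instance (idx : List Int) (shape : List Int) (out : Int) : Decidable (Spec_ravelIdx idx shape out) := by unfold Spec_ravelIdx; infer_instance

-- ===== CLAIM (what is proved, stated in full; the proofs are below) =====
def Claim_equal_ravelIdx : Prop := ∀ (idx : List Int) (shape : List Int), Dom_ravelIdx idx shape → Pre_ravelIdx idx shape → Spec_ravelIdx idx shape (ravelIdx idx shape)

-- ===== LEMMAS AND PROOFS =====

-- Horner fold with an arbitrary accumulator, against the (sum, stride) foldr.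
theorem horner_eq_foldr (ps : List (Int × Int)) (a : Int) :
    ps.foldl (fun I js => I * js.2 + js.1) a
      = a * (ps.foldr (fun q p => (p.1 + q.1 * p.2, p.2 * q.2)) ((0 : Int), (1 : Int))).2
        + (ps.foldr (fun q p => (p.1 + q.1 * p.2, p.2 * q.2)) ((0 : Int), (1 : Int))).1 := by
  induction ps generalizing a with
  | nil => simp
  | cons q ps ih => simp [List.foldl_cons, List.foldr_cons, ih]; ring

theorem zip_reverse (v t : List Int) (h : v.length = t.length) :
    v.reverse.zip t.reverse = (v.zip t).reverse := by
  induction v generalizing t with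
  | nil => cases t <;> simp_all
  | cons x v ih =>
    cases t with
    | nil => simp_all
    | cons y t =>
      simp only [List.length_cons, Nat.add_right_cancel_iff] at h
      simp only [List.reverse_cons]
      rw [List.zip_append (by simp [h]), ih t h]
      simp

-- generic: fold over range m reading getD equals fold over zip, for equal-length lists
theorem foldl_range_getD (m : Nat) (vr tr : List Int) (hv : vr.length = m) (ht : tr.length = m)
    (init : Int × Int) :
    (List.range m).foldl (fun p k => (p.1 + vr.getD k 0 * p.2, p.2 * tr.getD k 0)) init
      = (vr.zip tr).foldl (fun p q => (p.1 + q.1 * p.2, p.2 * q.2)) init := by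
  induction m generalizing vr tr init with
  | zero =>
    have : vr = [] := List.eq_nil_of_length_eq_zero hv
    have : tr = [] := List.eq_nil_of_length_eq_zero ht
    simp_all
  | succ m ih =>
    cases vr with
    | nil => simp at hv
    | cons x vr =>
      cases tr with
      | nil => simp at ht
      | cons y tr =>
        simp only [List.length_cons, Nat.add_right_cancel_iff] at hv ht
        rw [List.range_succ_eq_map, List.foldl_cons, List.foldl_map]
        simp only [List.getD_cons_zero, List.getD_cons_succ]
        rw [ih vr tr hv ht]
        simp

-- A's normalization comprehension equals B's zip-map normalization (when idx is no longer than shape).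
theorem norm_eq (idx shape : List Int) (h : idx.length ≤ shape.length) :
    (List.range idx.length).map
        (fun k => if idx.getD k 0 < 0 then shape.getD k 0 + idx.getD k 0 else idx.getD k 0)
      = (idx.zip shape).map (fun js => if js.1 < 0 then js.2 + js.1 else js.1) := by
  apply List.ext_getElem
  · simp [Nat.min_eq_left h]
  · intro k h1 h2
    simp only [List.length_map, List.length_range] at h1
    simp only [List.getElem_map, List.getElem_range, List.getElem_zip,
      List.getD_eq_getElem _ _ h1, List.getD_eq_getElem _ _ (lt_of_lt_of_le h1 h)]

-- A's back-indexed stride loop equals B's Horner fold over the zipped tail.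
theorem key (v shape : List Int) (m : Nat) (hv : v.length = m) (h : m ≤ shape.length) :
    ((PySem.List.pyRange (-1) (-(m : Int) - 1) (-1)).foldl
        (fun (p : Int × Int) i =>
          (p.1 + PySem.List.pyGetD v i 0 * p.2, p.2 * PySem.List.pyGetD shape i 0)) (0, 1)).1
      = (v.zip (shape.drop (shape.length - m))).foldl (fun I js => I * js.2 + js.1) 0 := by
  have hm : ((-1 : Int) - (-(m : Int) - 1)).toNat = m := by omega
  rw [PySem.List.pyRange_neg_one, hm, List.foldl_map]
  rw [PySem.List.foldl_congr_mem _ _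
    (fun (p : Int × Int) k =>
      (p.1 + v.reverse.getD k 0 * p.2, p.2 * ((shape.drop (shape.length - m)).reverse).getD k 0)) _
    (by
      intro acc k hk
      simp only [List.mem_range] at hk
      have h1 : (-1 : Int) - (k : Int) = -(((k + 1 : Nat) : Int)) := by push_cast; ring
      rw [h1, PySem.List.pyGetD_neg_natCast v (k + 1) 0 (by omega) (by omega),
        PySem.List.pyGetD_neg_natCast shape (k + 1) 0 (by omega) (by omega)]
      have e1 : v[v.length - (k + 1)]'(by omega) = v.reverse.getD k 0 := by
        rw [List.getD_eq_getElem _ _ (by simp [hv]; omega), List.getElem_reverse]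
        congr 1
        omega
      have e2 : shape[shape.length - (k + 1)]'(by omega)
          = ((shape.drop (shape.length - m)).reverse).getD k 0 := by
        rw [List.getD_eq_getElem _ _ (by simp; omega), List.getElem_reverse,
          List.getElem_drop]
        congr 1
        simp
        omega
      rw [e1, e2])]
  rw [foldl_range_getD m v.reverse _ (by simp [hv]) (by simp; omega) _,
    zip_reverse _ _ (by simp [hv]; omega), List.foldl_reverse, horner_eq_foldr]
  simp

theorem ravelIdx_eq (idx shape : List Int) (hpre : idx.length ≤ shape.length) :
    ravelIdx idx shape = ravelIdx_alt idx shape := by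
  have hn : ((shape.length : Int) - (idx.length : Int)).toNat = shape.length - idx.length := by
    omega
  unfold ravelIdx ravelIdx_alt
  simp only [PySem.List.pyRange_zero_natCast, List.map_map, Function.comp_def,
    PySem.List.pyGetD_natCast,
    PySem.List.slice_from _ (by omega : (0 : Int) ≤ (shape.length : Int) - (idx.length : Int)),
    hn, norm_eq idx shape hpre, List.length_map, List.length_zip, Nat.min_eq_left hpre]
  exact key _ shape idx.length (by simp [Nat.min_eq_left hpre]) hpre

-- ===== VERDICT (by name: the statement is the Claim_ definition above) =====
theorem ravelIdx_spec : Claim_equal_ravelIdx := by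
  intro idx shape _ hpre
  unfold Spec_ravelIdx
  exact ravelIdx_eq idx shape hpre
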